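-- pv_equiv track=rewrite | github.com/DKU-STUDY/Algorithm | programmers/난이도별/level02.2개_이하로_다른_비트/6047198844.py | solution
-- ===== SOURCE A (Python) =====
-- def solution(numbers):
--     answer = []
--
--     for number in numbers:
--         #0이 위치하는 자리수.
--         zero_digit = 0
--         #0을 발견할때까지.
--         while number & (1 << zero_digit) != 0:
--             zero_digit += 1
--         res = number
--         #0의 자리수를 1로 변경한다.
--         res |= 1 << zero_digit
--         #1의 자리수를 0으로 변경한다.
--         if zero_digit != 0:
--             res ^= 1 << (zero_digit - 1)
--
--         answer.append(res)
--
--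
--     return answer
-- ===== SOURCE B (Python) =====
-- def solution(numbers):
--     def flip(n):
--         lowbit = (n + 1) & ~n
--         return (n | lowbit) ^ (lowbit >> 1)
--     return [flip(n) for n in numbers]
-- ===== Notes on version B (the rewrite author's own statement) =====
-- stated objective: simpler
-- what changed: B replaces A's per-number while-loop that scans for the lowest zero bit with the closed-form bit trick lowbit = (n+1) & ~n, computing each result as (n | lowbit) ^ (lowbit >> 1) in a comprehension.
import Mathlib
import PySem

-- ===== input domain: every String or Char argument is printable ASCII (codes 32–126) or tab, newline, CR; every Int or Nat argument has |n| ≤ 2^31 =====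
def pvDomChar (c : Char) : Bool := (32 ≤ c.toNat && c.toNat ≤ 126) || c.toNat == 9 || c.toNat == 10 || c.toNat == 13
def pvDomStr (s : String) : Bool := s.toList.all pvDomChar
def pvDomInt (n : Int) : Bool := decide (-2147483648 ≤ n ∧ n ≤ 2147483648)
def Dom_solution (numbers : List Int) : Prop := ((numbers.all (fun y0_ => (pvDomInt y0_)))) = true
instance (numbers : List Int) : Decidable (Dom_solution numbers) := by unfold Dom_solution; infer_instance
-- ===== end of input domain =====

-- B replaces A's bit-scanning while-loop with the closed-form lowbit trick (n+1) & ~n; same results, simpler code.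


-- ===== PORT A =====
-- the while-loop 'while number & (1 << zero_digit) != 0: zero_digit += 1'; the fuel (64) is a pure
-- totality guard: on every admitted input the loop stops at a bit position ≤ 32 (proved below)
def findZero (number : Int) : Nat → Nat → Nat
  | 0, z => z
  | fuel + 1, z =>
    if PySem.Int.band number ((1:Int) <<< z) ≠ 0 then findZero number fuel (z + 1) else z

-- body of A's for-loop for one number
def solutionStep (number : Int) : Int :=
  let zero_digit := findZero number 64 0
  let res := PySem.Int.bor number ((1:Int) <<< zero_digit)
  if zero_digit ≠ 0 then PySem.Int.bxor res ((1:Int) <<< (zero_digit - 1)) else res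

def solution (numbers : List Int) : List Int :=
  numbers.foldl (fun answer number => answer ++ [solutionStep number]) []

-- ===== PORT B =====
def flipAlt (n : Int) : Int :=
  let lowbit := PySem.Int.band (n + 1) (Int.not n)
  PySem.Int.bxor (PySem.Int.bor n lowbit) (lowbit >>> (1 : Nat))

def solution_alt (numbers : List Int) : List Int := numbers.map flipAlt

-- ===== PRECONDITION & SPEC =====
-- A's while-loop never terminates on the number -1 (every bit of -1 is set), so A returns on exactly
-- the lists avoiding -1; Pre_ excludes nothing A returns on.
def Pre_solution (numbers : List Int) : Prop := (-1 : Int) ∉ numbers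
instance (numbers : List Int) : Decidable (Pre_solution numbers) := by unfold Pre_solution; infer_instance
def pvWitness_solution : List Int := [2, 7, 0, -8, 12345]

def Spec_solution (numbers : List Int) (out : List Int) : Prop := out = solution_alt numbers
instance (numbers : List Int) (out : List Int) : Decidable (Spec_solution numbers out) := by unfold Spec_solution; infer_instance

-- ===== CLAIM (what is proved, stated in full; the proofs are below) =====
def Claim_equal_solution : Prop := ∀ (numbers : List Int), Dom_solution numbers → Pre_solution numbers → Spec_solution numbers (solution numbers)

-- ===== LEMMAS AND PROOFS =====
lemma nat_bit_decomp (A : Nat) : Nat.bit (decide (A % 2 = 1)) (A / 2) = A := by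
  by_cases h : A % 2 = 1 <;> simp [h, Nat.bit_val] <;> omega
lemma nat_land_rec (A B : Nat) : A &&& B = 2 * (A / 2 &&& B / 2) + (A % 2) * (B % 2) := by
  conv_lhs => rw [← nat_bit_decomp A, ← nat_bit_decomp B, Nat.land_bit]
  rw [Nat.bit_val]
  rcases Nat.mod_two_eq_zero_or_one A with h1 | h1 <;>
    rcases Nat.mod_two_eq_zero_or_one B with h2 | h2 <;> simp [h1, h2]
lemma nat_lor_rec (A B : Nat) : A ||| B = 2 * (A / 2 ||| B / 2) + (A % 2 + B % 2 - (A % 2) * (B % 2)) := by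
  conv_lhs => rw [← nat_bit_decomp A, ← nat_bit_decomp B, Nat.lor_bit]
  rw [Nat.bit_val]
  rcases Nat.mod_two_eq_zero_or_one A with h1 | h1 <;>
    rcases Nat.mod_two_eq_zero_or_one B with h2 | h2 <;> simp [h1, h2]

-- unfolded forms of PySem.Int.band in each sign case, phrased on casts of Nats

lemma band_nn (A B : Nat) : PySem.Int.band (A:Int) (B:Int) = ((A &&& B : Nat) : Int) :=
  PySem.Int.band_natCast A B
lemma band_np (A M : Nat) : PySem.Int.band (A:Int) (-(M:Int) - 1) = ((A - (A &&& M) : Nat) : Int) := by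
  have h1 : (0:Int) ≤ (A:Int) := by omega
  have h2 : ¬ (0:Int) ≤ (-(M:Int) - 1) := by omega
  simp only [PySem.Int.band, if_pos h1, if_neg h2]
  norm_num
lemma band_pn (M B : Nat) : PySem.Int.band (-(M:Int) - 1) (B:Int) = ((B - (B &&& M) : Nat) : Int) := by
  have h1 : ¬ (0:Int) ≤ (-(M:Int) - 1) := by omega
  have h2 : (0:Int) ≤ (B:Int) := by omega
  simp only [PySem.Int.band, if_pos h2, if_neg h1]
  norm_num
lemma band_pp (Ma Mb : Nat) : PySem.Int.band (-(Ma:Int) - 1) (-(Mb:Int) - 1) = -((Ma ||| Mb : Nat) : Int) - 1 := by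
  have h1 : ¬ (0:Int) ≤ (-(Ma:Int) - 1) := by omega
  have h2 : ¬ (0:Int) ≤ (-(Mb:Int) - 1) := by omega
  simp only [PySem.Int.band, if_neg h1, if_neg h2]
  norm_num

lemma band_rec (a b : Int) :
    PySem.Int.band a b = 2 * PySem.Int.band (a / 2) (b / 2) + (a % 2) * (b % 2) := by
  rcases le_or_gt 0 a with ha | ha <;> rcases le_or_gt 0 b with hb | hb
  · obtain ⟨A, rfl⟩ := Int.eq_ofNat_of_zero_le ha
    obtain ⟨B, rfl⟩ := Int.eq_ofNat_of_zero_le hb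
    have e1 : ((A:Int)) / 2 = ((A/2 : Nat) : Int) := by omega
    have e2 : ((B:Int)) / 2 = ((B/2 : Nat) : Int) := by omega
    rw [band_nn, e1, e2, band_nn]
    have hrec := nat_land_rec A B
    have pA : ((A:Int)) % 2 = ((A % 2 : Nat) : Int) := by omega
    have pB : ((B:Int)) % 2 = ((B % 2 : Nat) : Int) := by omega
    rw [pA, pB]
    rcases Nat.mod_two_eq_zero_or_one A with h1 | h1 <;>
      rcases Nat.mod_two_eq_zero_or_one B with h2 | h2 <;>
      simp [h1, h2] at hrec ⊢ <;> omega
  · obtain ⟨A, rfl⟩ := Int.eq_ofNat_of_zero_le ha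
    obtain ⟨M, hM⟩ : ∃ M : Nat, b = -(M:Int) - 1 := ⟨(-b-1).toNat, by omega⟩
    subst hM
    have e1 : ((A:Int)) / 2 = ((A/2 : Nat) : Int) := by omega
    have e2 : (-(M:Int) - 1) / 2 = -((M/2 : Nat) : Int) - 1 := by omega
    rw [band_np, e1, e2, band_np]
    have l1 := Nat.and_le_left (n := A) (m := M)
    have l2 := Nat.and_le_left (n := A/2) (m := M/2)
    have hrec := nat_land_rec A M
    have pA : ((A:Int)) % 2 = ((A % 2 : Nat) : Int) := by omega
    have pM : (-(M:Int) - 1) % 2 = 1 - ((M % 2 : Nat) : Int) := by omega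
    rw [pA, pM, Int.natCast_sub l1, Int.natCast_sub l2]
    rcases Nat.mod_two_eq_zero_or_one A with h1 | h1 <;>
      rcases Nat.mod_two_eq_zero_or_one M with h2 | h2 <;>
      simp [h1, h2] at hrec ⊢ <;> omega
  · obtain ⟨B, rfl⟩ := Int.eq_ofNat_of_zero_le hb
    obtain ⟨M, hM⟩ : ∃ M : Nat, a = -(M:Int) - 1 := ⟨(-a-1).toNat, by omega⟩
    subst hM
    have e1 : ((B:Int)) / 2 = ((B/2 : Nat) : Int) := by omega
    have e2 : (-(M:Int) - 1) / 2 = -((M/2 : Nat) : Int) - 1 := by omega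
    rw [band_pn, e1, e2, band_pn]
    have l1 := Nat.and_le_left (n := B) (m := M)
    have l2 := Nat.and_le_left (n := B/2) (m := M/2)
    have hrec := nat_land_rec B M
    have pB : ((B:Int)) % 2 = ((B % 2 : Nat) : Int) := by omega
    have pM : (-(M:Int) - 1) % 2 = 1 - ((M % 2 : Nat) : Int) := by omega
    rw [pB, pM, Int.natCast_sub l1, Int.natCast_sub l2]
    rcases Nat.mod_two_eq_zero_or_one B with h1 | h1 <;>
      rcases Nat.mod_two_eq_zero_or_one M with h2 | h2 <;>
      simp [h1, h2] at hrec ⊢ <;> omega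
  · obtain ⟨Ma, hMa⟩ : ∃ M : Nat, a = -(M:Int) - 1 := ⟨(-a-1).toNat, by omega⟩
    obtain ⟨Mb, hMb⟩ : ∃ M : Nat, b = -(M:Int) - 1 := ⟨(-b-1).toNat, by omega⟩
    subst hMa; subst hMb
    have e1 : (-(Ma:Int) - 1) / 2 = -((Ma/2 : Nat) : Int) - 1 := by omega
    have e2 : (-(Mb:Int) - 1) / 2 = -((Mb/2 : Nat) : Int) - 1 := by omega
    rw [band_pp, e1, e2, band_pp]
    have hrec := nat_lor_rec Ma Mb
    have pMa : (-(Ma:Int) - 1) % 2 = 1 - ((Ma % 2 : Nat) : Int) := by omega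
    have pMb : (-(Mb:Int) - 1) % 2 = 1 - ((Mb % 2 : Nat) : Int) := by omega
    rw [pMa, pMb]
    rcases Nat.mod_two_eq_zero_or_one Ma with h1 | h1 <;>
      rcases Nat.mod_two_eq_zero_or_one Mb with h2 | h2 <;>
      simp [h1, h2] at hrec ⊢ <;> omega

lemma bor_nn (A B : Nat) : PySem.Int.bor (A:Int) (B:Int) = ((A ||| B : Nat) : Int) :=
  PySem.Int.bor_natCast A B
lemma bor_np (A M : Nat) : PySem.Int.bor (A:Int) (-(M:Int) - 1) = -((M - (M &&& A) : Nat) : Int) - 1 := by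
  have h1 : (0:Int) ≤ (A:Int) := by omega
  have h2 : ¬ (0:Int) ≤ (-(M:Int) - 1) := by omega
  simp only [PySem.Int.bor, if_pos h1, if_neg h2]
  norm_num
lemma bor_pn (M B : Nat) : PySem.Int.bor (-(M:Int) - 1) (B:Int) = -((M - (M &&& B) : Nat) : Int) - 1 := by
  have h1 : ¬ (0:Int) ≤ (-(M:Int) - 1) := by omega
  have h2 : (0:Int) ≤ (B:Int) := by omega
  simp only [PySem.Int.bor, if_pos h2, if_neg h1]
  norm_num
lemma bor_pp (Ma Mb : Nat) : PySem.Int.bor (-(Ma:Int) - 1) (-(Mb:Int) - 1) = -((Ma &&& Mb : Nat) : Int) - 1 := by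
  have h1 : ¬ (0:Int) ≤ (-(Ma:Int) - 1) := by omega
  have h2 : ¬ (0:Int) ≤ (-(Mb:Int) - 1) := by omega
  simp only [PySem.Int.bor, if_neg h1, if_neg h2]
  norm_num




lemma bor_rec (a b : Int) :
    PySem.Int.bor a b = 2 * PySem.Int.bor (a / 2) (b / 2) + (a % 2 + b % 2 - (a % 2) * (b % 2)) := by
  rcases le_or_gt 0 a with ha | ha <;> rcases le_or_gt 0 b with hb | hb
  · obtain ⟨A, rfl⟩ := Int.eq_ofNat_of_zero_le ha
    obtain ⟨B, rfl⟩ := Int.eq_ofNat_of_zero_le hb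
    have e1 : ((A:Int)) / 2 = ((A/2 : Nat) : Int) := by omega
    have e2 : ((B:Int)) / 2 = ((B/2 : Nat) : Int) := by omega
    rw [bor_nn, e1, e2, bor_nn]
    have hrec := nat_lor_rec A B
    have pA : ((A:Int)) % 2 = ((A % 2 : Nat) : Int) := by omega
    have pB : ((B:Int)) % 2 = ((B % 2 : Nat) : Int) := by omega
    rw [pA, pB]
    rcases Nat.mod_two_eq_zero_or_one A with h1 | h1 <;>
      rcases Nat.mod_two_eq_zero_or_one B with h2 | h2 <;>
      simp [h1, h2] at hrec ⊢ <;> omega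
  · obtain ⟨A, rfl⟩ := Int.eq_ofNat_of_zero_le ha
    obtain ⟨M, hM⟩ : ∃ M : Nat, b = -(M:Int) - 1 := ⟨(-b-1).toNat, by omega⟩
    subst hM
    have e1 : ((A:Int)) / 2 = ((A/2 : Nat) : Int) := by omega
    have e2 : (-(M:Int) - 1) / 2 = -((M/2 : Nat) : Int) - 1 := by omega
    rw [bor_np, e1, e2, bor_np]
    have l1 := Nat.and_le_left (n := M) (m := A)
    have l2 := Nat.and_le_left (n := M/2) (m := A/2)
    have hrec := nat_land_rec M A
    have pA : ((A:Int)) % 2 = ((A % 2 : Nat) : Int) := by omega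
    have pM : (-(M:Int) - 1) % 2 = 1 - ((M % 2 : Nat) : Int) := by omega
    rw [pA, pM, Int.natCast_sub l1, Int.natCast_sub l2]
    rcases Nat.mod_two_eq_zero_or_one A with h1 | h1 <;>
      rcases Nat.mod_two_eq_zero_or_one M with h2 | h2 <;>
      simp [h1, h2] at hrec ⊢ <;> omega
  · obtain ⟨B, rfl⟩ := Int.eq_ofNat_of_zero_le hb
    obtain ⟨M, hM⟩ : ∃ M : Nat, a = -(M:Int) - 1 := ⟨(-a-1).toNat, by omega⟩
    subst hM
    have e1 : ((B:Int)) / 2 = ((B/2 : Nat) : Int) := by omega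
    have e2 : (-(M:Int) - 1) / 2 = -((M/2 : Nat) : Int) - 1 := by omega
    rw [bor_pn, e1, e2, bor_pn]
    have l1 := Nat.and_le_left (n := M) (m := B)
    have l2 := Nat.and_le_left (n := M/2) (m := B/2)
    have hrec := nat_land_rec M B
    have pB : ((B:Int)) % 2 = ((B % 2 : Nat) : Int) := by omega
    have pM : (-(M:Int) - 1) % 2 = 1 - ((M % 2 : Nat) : Int) := by omega
    rw [pB, pM, Int.natCast_sub l1, Int.natCast_sub l2]
    rcases Nat.mod_two_eq_zero_or_one B with h1 | h1 <;>
      rcases Nat.mod_two_eq_zero_or_one M with h2 | h2 <;>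
      simp [h1, h2] at hrec ⊢ <;> omega
  · obtain ⟨Ma, hMa⟩ : ∃ M : Nat, a = -(M:Int) - 1 := ⟨(-a-1).toNat, by omega⟩
    obtain ⟨Mb, hMb⟩ : ∃ M : Nat, b = -(M:Int) - 1 := ⟨(-b-1).toNat, by omega⟩
    subst hMa; subst hMb
    have e1 : (-(Ma:Int) - 1) / 2 = -((Ma/2 : Nat) : Int) - 1 := by omega
    have e2 : (-(Mb:Int) - 1) / 2 = -((Mb/2 : Nat) : Int) - 1 := by omega
    rw [bor_pp, e1, e2, bor_pp]
    have hrec := nat_land_rec Ma Mb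
    have pMa : (-(Ma:Int) - 1) % 2 = 1 - ((Ma % 2 : Nat) : Int) := by omega
    have pMb : (-(Mb:Int) - 1) % 2 = 1 - ((Mb % 2 : Nat) : Int) := by omega
    rw [pMa, pMb]
    rcases Nat.mod_two_eq_zero_or_one Ma with h1 | h1 <;>
      rcases Nat.mod_two_eq_zero_or_one Mb with h2 | h2 <;>
      simp [h1, h2] at hrec ⊢ <;> omega


lemma int_not_eq (n : Int) : Int.not n = -n - 1 := by
  unfold Int.not
  cases n
  · simp [Int.negSucc_eq]; ring
  · simp [Int.negSucc_eq]

lemma band_not_self (a : Int) : PySem.Int.band a (Int.not a) = 0 := by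
  rw [int_not_eq]
  rcases le_or_gt 0 a with ha | ha
  · obtain ⟨A, rfl⟩ := Int.eq_ofNat_of_zero_le ha
    rw [band_np]
    simp [Nat.and_self]
  · obtain ⟨M, hM⟩ : ∃ M : Nat, a = -(M:Int) - 1 := ⟨(-a-1).toNat, by omega⟩
    subst hM
    have : -(-(M:Int) - 1) - 1 = (M:Int) := by ring
    rw [this, band_pn]
    simp [Nat.and_self]

lemma band_pow (s : Nat) (a : Int) :
    PySem.Int.band a (2 ^ s) = if a / 2 ^ s % 2 = 1 then (2 ^ s : Int) else 0 := by
  induction s generalizing a with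
  | zero =>
    have h1 := PySem.Int.band_one a
    have h2 : PySem.Int.mod a 2 = a % 2 := PySem.Int.mod_eq_emod_of_pos (by norm_num)
    simp only [pow_zero] at *
    rw [h1, h2]
    have := Int.emod_two_eq a
    split <;> omega
  | succ s ih =>
    rw [band_rec]
    have e1 : ((2:Int) ^ (s+1)) / 2 = 2 ^ s := by rw [pow_succ]; exact Int.mul_ediv_cancel _ (by norm_num)
    have e2 : ((2:Int) ^ (s+1)) % 2 = 0 := by rw [pow_succ]; simp
    rw [e1, e2, ih (a / 2)]
    have e3 : a / 2 / 2 ^ s = a / 2 ^ (s+1) := by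
      rw [Int.ediv_ediv_of_nonneg (by norm_num), ← pow_succ']
    rw [e3, pow_succ]
    split <;> ring

lemma bor_pow (s : Nat) (a : Int) :
    PySem.Int.bor a (2 ^ s) = if a / 2 ^ s % 2 = 1 then a else a + 2 ^ s := by
  induction s generalizing a with
  | zero =>
    rw [pow_zero, bor_rec]
    have h1 : (1:Int) / 2 = 0 := by norm_num
    rw [h1, PySem.Int.bor_zero]
    have h2 : a / 1 = a := Int.ediv_one a
    have := Int.emod_two_eq a
    split <;> omega
  | succ s ih =>
    rw [bor_rec]
    have e1 : ((2:Int) ^ (s+1)) / 2 = 2 ^ s := by rw [pow_succ]; exact Int.mul_ediv_cancel _ (by norm_num)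
    have e2 : ((2:Int) ^ (s+1)) % 2 = 0 := by rw [pow_succ]; simp
    have e3 : a / 2 / 2 ^ s = a / 2 ^ (s+1) := by rw [Int.ediv_ediv_of_nonneg (by norm_num), ← pow_succ']
    rw [e1, e2, ih (a / 2), e3]
    have hp : (2:Int) ^ (s+1) = 2 * 2 ^ s := by ring
    split <;> omega


lemma band_lowbit (s : Nat) (q : Int) :
    PySem.Int.band (2 ^ s * (2 * q + 1)) (-(2 ^ s * (2 * q + 1))) = 2 ^ s := by
  induction s generalizing q with
  | zero =>
    rw [pow_zero, one_mul, band_rec]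
    have e1 : (2 * q + 1) / 2 = q := by omega
    have e2 : (-(2 * q + 1)) / 2 = -q - 1 := by omega
    have e3 : (2 * q + 1) % 2 = 1 := by omega
    have e4 : (-(2 * q + 1)) % 2 = 1 := by omega
    have h0 := band_not_self q
    rw [int_not_eq] at h0
    rw [e1, e2, e3, e4, h0]
    norm_num
  | succ s ih =>
    rw [band_rec]
    have hm : (2:Int) ^ (s+1) * (2 * q + 1) = 2 * (2 ^ s * (2 * q + 1)) := by ring
    have e1 : ((2:Int) ^ (s+1) * (2 * q + 1)) / 2 = 2 ^ s * (2 * q + 1) := by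
      rw [hm]; exact Int.mul_ediv_cancel_left _ (by norm_num)
    have e2 : (-((2:Int) ^ (s+1) * (2 * q + 1))) / 2 = -(2 ^ s * (2 * q + 1)) := by
      rw [hm, show -(2 * (2^s * (2*q+1))) = 2 * -(2^s * (2*q+1)) by ring]
      exact Int.mul_ediv_cancel_left _ (by norm_num)
    have e3 : ((2:Int) ^ (s+1) * (2 * q + 1)) % 2 = 0 := by rw [hm]; simp
    rw [e1, e2, e3, ih q]
    ring

lemma exists_odd_decomp (m : Int) (hm : m ≠ 0) : ∃ z q, m = 2 ^ z * (2 * q + 1) := by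
  induction hn : m.natAbs using Nat.strong_induction_on generalizing m with
  | _ n ih =>
    rcases Int.emod_two_eq m with he | he
    · have hhalf : m / 2 ≠ 0 := by omega
      obtain ⟨z, q, hq⟩ := ih (m / 2).natAbs (by omega) (m / 2) hhalf rfl
      refine ⟨z + 1, q, ?_⟩
      have : m = 2 * (m / 2) := by omega
      rw [this, hq]; ring
    · exact ⟨0, m / 2, by simp; omega⟩

lemma ediv_mul_add (c r : Int) (j : Nat) (h0 : 0 ≤ r) (h1 : r < 2 ^ j) :
    (c * 2 ^ j + r) / 2 ^ j = c := by
  rw [add_comm, Int.add_mul_ediv_right _ _ (by positivity : (0:Int) < 2 ^ j).ne']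
  rw [Int.ediv_eq_zero_of_lt h0 h1, zero_add]

lemma one_shl (j : Nat) : (1 : Int) <<< j = 2 ^ j := by simp [Int.shiftLeft_eq]

lemma findZero_eq (n : Int) (z : Nat)
    (hlt : ∀ j, j < z → PySem.Int.band n ((1:Int) <<< j) ≠ 0)
    (hz : PySem.Int.band n ((1:Int) <<< z) = 0) :
    ∀ fuel c, c ≤ z → z < c + fuel → findZero n fuel c = z := by
  intro fuel
  induction fuel with
  | zero => intro c hc hb; omega
  | succ f ih =>
    intro c hc hb
    rcases eq_or_lt_of_le hc with rfl | hclt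
    · simp [findZero, hz]
    · simp only [findZero]
      rw [if_pos (hlt c hclt)]
      exact ih (c + 1) hclt (by omega)

lemma bit_lt (n q : Int) (z j : Nat) (hn : n = q * 2 ^ (z + 1) + 2 ^ z - 1) (hj : j < z) :
    n / 2 ^ j % 2 = 1 := by
  obtain ⟨d, rfl⟩ : ∃ d, z = j + (d + 1) := ⟨z - j - 1, by omega⟩
  have hsplit : n = (q * 2 ^ (d + 2) + 2 ^ (d + 1) - 1) * 2 ^ j + (2 ^ j - 1) := by
    rw [hn, show j + (d + 1) + 1 = (d + 2) + j by omega, show j + (d + 1) = (d + 1) + j by omega,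
      pow_add, pow_add]
    ring
  have hpos : (0:Int) < 2 ^ j := by positivity
  rw [hsplit, ediv_mul_add _ _ _ (by omega) (by omega)]
  have h1 : q * 2 ^ (d + 2) = 2 * (q * 2 ^ (d + 1)) := by ring
  have h2 : (2:Int) ^ (d + 1) = 2 * 2 ^ d := by ring
  omega
lemma bit_z (n q : Int) (z : Nat) (hn : n = q * 2 ^ (z + 1) + 2 ^ z - 1) :
    n / 2 ^ z % 2 = 0 := by
  have hsplit : n = (2 * q) * 2 ^ z + (2 ^ z - 1) := by rw [hn, pow_succ]; ring
  have hpos : (0:Int) < 2 ^ z := by positivity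
  rw [hsplit, ediv_mul_add _ _ _ (by omega) (by omega)]
  omega

lemma step_eq (n : Int) (h1 : -2147483648 ≤ n) (h2 : n ≤ 2147483648) (h3 : n ≠ -1) :
    solutionStep n = flipAlt n := by
  obtain ⟨z, q, hm⟩ := exists_odd_decomp (n + 1) (by omega)
  have hn : n = q * 2 ^ (z + 1) + 2 ^ z - 1 := by
    have hr : (2:Int) ^ z * (2 * q + 1) = q * 2 ^ (z + 1) + 2 ^ z := by ring
    omega
  -- z is small
  have hzb : z ≤ 31 := by
    by_contra h
    have h32 : (2:Int) ^ 32 ≤ 2 ^ z := by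
      apply pow_le_pow_right₀ (by norm_num); omega
    have habs : (2:Int) ^ z ≤ 2147483649 := by
      rcases le_or_gt 0 q with hq | hq
      · nlinarith [pow_pos (show (0:Int) < 2 by norm_num) z]
      · nlinarith [pow_pos (show (0:Int) < 2 by norm_num) z]
    norm_num at h32 habs
    omega
  -- loop facts
  have hlt : ∀ j, j < z → PySem.Int.band n ((1:Int) <<< j) ≠ 0 := by
    intro j hj
    rw [one_shl, band_pow, if_pos (bit_lt n q z j hn hj)]
    positivity
  have hz0 : PySem.Int.band n ((1:Int) <<< z) = 0 := by
    rw [one_shl, band_pow, if_neg]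
    rw [bit_z n q z hn]
    norm_num
  have hfind : findZero n 64 0 = z := findZero_eq n z hlt hz0 64 0 (by omega) (by omega)
  -- both branches
  have hbor : PySem.Int.bor n (2 ^ z) = n + 2 ^ z := by
    rw [bor_pow, if_neg]; rw [bit_z n q z hn]; norm_num
  have hlow : PySem.Int.band (n + 1) (Int.not n) = 2 ^ z := by
    rw [int_not_eq, show -n - 1 = -(n+1) by ring, hm, band_lowbit]
  simp only [solutionStep, flipAlt, hfind, hlow, one_shl, hbor]
  cases z with
  | zero =>
    have hs1 : ((2:Int) ^ 0) >>> (1:Nat) = 0 := by decide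
    rw [hs1, PySem.Int.bxor_zero]
    simp
  | succ w =>
    have hsr : ((2:Int) ^ (w + 1)) >>> (1:Nat) = 2 ^ w := by
      rw [Int.shiftRight_eq_div_pow, pow_succ]
      norm_num
    rw [hsr, if_pos (by omega : w + 1 ≠ 0)]
    norm_num

-- ===== VERDICT (by name: the statement is the Claim_ definition above) =====
theorem solution_spec : Claim_equal_solution := by
  intro numbers hdom hpre
  show solution numbers = solution_alt numbers
  unfold solution solution_alt
  rw [PySem.List.foldl_append_singleton_eq_map solutionStep numbers [], List.nil_append]
  apply List.map_congr_left
  intro a ha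
  simp only [Dom_solution, List.all_eq_true, pvDomInt, decide_eq_true_eq] at hdom
  obtain ⟨hlo, hhi⟩ := hdom a ha
  exact step_eq a hlo hhi (fun h => hpre (h ▸ ha))
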